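-- pv_equiv track=rewrite | github.com/gawdeganesh/Data-Engineering | DSA/Interview/39. freq_adjacent_pair.py | freq_char_pair
-- ===== SOURCE A (Python) =====
-- def freq_char_pair(input_string: str) -> dict:
--     list = []
--     first_pair = input_string[:2]
--
--     list.append(first_pair)
--
--     for i in range(1, len(input_string)):
--
--         if i <= len(input_string) - 2:
--             next_pair = input_string[i - 1 : i + 2]
--             list.append(next_pair)
--         else:
--             next_pair = input_string[i - 1 : i + 1]
--             list.append(next_pair)
--
--     dict_freq = {ele: list.count(ele) for ele in list}
--
--     return dict_freq
-- ===== SOURCE B (Python) =====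
-- def freq_char_pair(input_string: str) -> dict:
--     # Build the same window list A builds (2-char ends, 3-char interior windows).
--     n = len(input_string)
--     subs = [input_string[:2]]
--     for i in range(1, n):
--         if i <= n - 2:
--             subs.append(input_string[i - 1:i + 2])
--         else:
--             subs.append(input_string[i - 1:i + 1])
--     # Count by sorting a copy and grouping runs of equal consecutive elements.
--     counts = {}
--     prev = None
--     run = 0
--     for w in sorted(subs):
--         if w == prev:
--             run += 1
--         else:
--             if prev is not None:
--                 counts[prev] = run
--             prev = w
--             run = 1
--     if prev is not None:
--         counts[prev] = run
--     # Rebuild the dict in original first-appearance order, one lookup per window.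
--     result = {}
--     for w in subs:
--         if w not in result:
--             result[w] = counts[w]
--     return result
-- ===== Notes on version B (the rewrite author's own statement) =====
-- stated objective: faster
-- what changed: B counts the windows by sorting a copy and grouping runs of equal consecutive elements into a table in one linear grouping pass, then rebuilds the dict in first-appearance order with one lookup per window, replacing A's dict comprehension that rescans the whole window list with list.count for every element.
import Mathlib
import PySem

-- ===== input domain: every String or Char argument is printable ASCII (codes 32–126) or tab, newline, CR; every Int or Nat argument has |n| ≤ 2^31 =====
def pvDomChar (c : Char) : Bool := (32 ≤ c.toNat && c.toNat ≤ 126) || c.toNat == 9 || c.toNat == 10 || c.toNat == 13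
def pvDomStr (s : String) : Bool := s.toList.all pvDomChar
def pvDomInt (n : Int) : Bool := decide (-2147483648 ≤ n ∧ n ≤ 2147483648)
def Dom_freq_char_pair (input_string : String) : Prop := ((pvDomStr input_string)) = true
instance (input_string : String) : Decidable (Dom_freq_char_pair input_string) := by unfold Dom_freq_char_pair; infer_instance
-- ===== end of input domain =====

-- B counts the windows by sorting a copy and grouping runs of equal consecutive
-- elements, then rebuilds the dict in first-appearance order, replacing A's
-- repeated list.count scans; return value only — neither version mutates its argument.

-- ===== PORT A =====
-- the window list A builds: [s[:2]] then, for i in range(1, len(s)), s[i-1:i+2] or s[i-1:i+1]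
def pvSubsA (s : String) : List String :=
  (PySem.List.pyRange 1 (PySem.Str.len s) 1).foldl
    (fun l i =>
      if i ≤ PySem.Str.len s - 2 then
        l ++ [PySem.Str.slice s (some (i - 1)) (some (i + 2))]
      else
        l ++ [PySem.Str.slice s (some (i - 1)) (some (i + 1))])
    ([] ++ [PySem.Str.slice s none (some 2)])

def freq_char_pair (input_string : String) : List (String × Int) :=
  ((pvSubsA input_string).foldl
    (fun d ele => d.insert ele ((pvSubsA input_string).count ele : Int))
    PySem.Dict.empty).items

-- ===== PORT B =====
-- B's window-building loop (same windows as A builds, by the same loop)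
def pvSubsB (s : String) : List String :=
  (PySem.List.pyRange 1 (PySem.Str.len s) 1).foldl
    (fun l i =>
      if i ≤ PySem.Str.len s - 2 then
        l ++ [PySem.Str.slice s (some (i - 1)) (some (i + 2))]
      else
        l ++ [PySem.Str.slice s (some (i - 1)) (some (i + 1))])
    [PySem.Str.slice s none (some 2)]

-- B's grouping loop body: state is (counts, prev, run)
def pvGroupStep (st : PySem.Dict String Int × Option String × Int) (w : String) :
    PySem.Dict String Int × Option String × Int :=
  if some w = st.2.1 then (st.1, st.2.1, st.2.2 + 1)
  else
    ((match st.2.1 with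
      | some p => st.1.insert p st.2.2
      | none => st.1), some w, 1)

-- after the loop: `if prev is not None: counts[prev] = run`
def pvFlush (st : PySem.Dict String Int × Option String × Int) : PySem.Dict String Int :=
  match st.2.1 with
  | some p => st.1.insert p st.2.2
  | none => st.1


def pvCounts (subs : List String) : PySem.Dict String Int :=
  pvFlush ((PySem.List.sorted subs (fun x => x) false).foldl pvGroupStep
    (PySem.Dict.empty, none, 0))

def freq_char_pair_alt (input_string : String) : List (String × Int) :=
  ((pvSubsB input_string).foldl
    (fun d w =>
      if d.contains w then d
      -- counts[w]: every w of subs is a key of counts, so the Python lookup returns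
      else d.insert w ((pvCounts (pvSubsB input_string)).getD w 0))
    PySem.Dict.empty).items

-- ===== PRECONDITION & SPEC =====
def Spec_freq_char_pair (input_string : String) (out : List (String × Int)) : Prop := out = freq_char_pair_alt input_string
instance (input_string : String) (out : List (String × Int)) : Decidable (Spec_freq_char_pair input_string out) := by unfold Spec_freq_char_pair; infer_instance

-- ===== CLAIM (what is proved, stated in full; the proofs are below) =====
def Claim_equal_freq_char_pair : Prop := ∀ (input_string : String), Dom_freq_char_pair input_string → Spec_freq_char_pair input_string (freq_char_pair input_string)

-- ===== LEMMAS AND PROOFS =====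

lemma group_invariant (l : List String) (c : PySem.Dict String Int) (p : String) (r : Int)
    (hp : ∀ x ∈ l, p ≤ x) (hs : l.Pairwise (· ≤ ·)) (w : String) :
    (pvFlush (l.foldl pvGroupStep (c, some p, r))).getD w 0 =
      if w = p then r + (l.count p : Int)
      else if w ∈ l then (l.count w : Int)
      else c.getD w 0 := by
  induction l generalizing c p r with
  | nil =>
      simp [pvFlush, PySem.Dict.getD_insert]
  | cons a t ih =>
      simp only [List.foldl_cons, pvGroupStep]
      by_cases ha : a = p
      · subst ha
        rw [if_pos rfl]
        rw [ih c a (r + 1) (fun x hx => hp x (List.mem_cons_of_mem a hx)) (List.Pairwise.of_cons hs)]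
        by_cases hw : w = a
        · subst hw
          simp [List.count_cons_self]
          ring
        · simp [hw, (show ¬ a = w from fun h => hw h.symm), List.mem_cons]
      · rw [if_neg (by simp [ha])]
        rw [ih (c.insert p r) a 1 (fun x hx => (List.pairwise_cons.mp hs).1 x hx) (List.Pairwise.of_cons hs)]
        have hpa : p ≤ a := hp a List.mem_cons_self
        have hpt : p ∉ t := fun hmem => ha (le_antisymm ((List.pairwise_cons.mp hs).1 p hmem) hpa)
        have hpnot : p ∉ a :: t := by
          simp only [List.mem_cons]
          rintro (h | h)
          · exact ha h.symm
          · exact hpt h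
        by_cases hw : w = a
        · subst hw
          simp [ha, List.count_cons_self]
          ring
        · by_cases hwp : w = p
          · subst hwp
            simp [hw, hpt, List.count_eq_zero_of_not_mem hpnot]
          · simp [hw, hwp, (show ¬ a = w from fun h => hw h.symm), List.mem_cons, PySem.Dict.getD_insert]


lemma counts_getD (l : List String) (w : String) (hw : w ∈ l) :
    (pvCounts l).getD w 0 = (l.count w : Int) := by
  unfold pvCounts
  have hmem : w ∈ PySem.List.sorted l (fun x => x) false :=
    (PySem.List.mem_sorted l (fun x => x) false w).mpr hw
  have hcount : (PySem.List.sorted l (fun x => x) false).count w = l.count w :=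
    (PySem.List.sorted_perm l (fun x => x) false).count_eq w
  cases hsor : PySem.List.sorted l (fun x => x) false with
  | nil => rw [hsor] at hmem; exact absurd hmem List.not_mem_nil
  | cons a t =>
      have hpw : (a :: t).Pairwise (· ≤ ·) := hsor ▸ PySem.List.sorted_pairwise l (fun x => x)
      have hcnt : (a :: t).count w = l.count w := hsor ▸ hcount
      simp only [List.foldl_cons, pvGroupStep]
      rw [if_neg (by simp)]
      rw [group_invariant t _ a 1 ((List.pairwise_cons.mp hpw).1) (List.Pairwise.of_cons hpw)]
      by_cases hwa : w = a
      · subst hwa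
        rw [if_pos rfl, ← hcnt, List.count_cons_self]
        push_cast; ring
      · have hwt : w ∈ t := by
          rw [hsor] at hmem
          rcases List.mem_cons.mp hmem with h | h
          · exact absurd h hwa
          · exact h
        rw [if_neg hwa, if_pos hwt, ← hcnt]
        simp [(show ¬ a = w from fun h => hwa h.symm)]

lemma insert_self_value {κ ν : Type} [BEq κ] [LawfulBEq κ]
    (d : PySem.Dict κ ν) (k : κ) (v : ν) (hnd : d.keys.Nodup)
    (h : d.get? k = some v) : d.insert k v = d := by
  apply PySem.Dict.ext
  have hc : d.contains k = true := by
    rw [PySem.Dict.contains_eq_isSome_get? d k, h]; rfl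
  rw [PySem.Dict.items_insert_of_contains d v hc]
  conv_rhs => rw [← List.map_id d.items]
  apply List.map_congr_left
  rintro ⟨k', v'⟩ hp
  by_cases hpk : k' == k
  · have hk : k' = k := beq_iff_eq.mp hpk
    have hg : d.get? k' = some v' := PySem.Dict.get?_of_mem_items d hp hnd
    rw [hk, h] at hg
    have hv : v = v' := Option.some_inj.mp hg
    simp [hk, hv]
  · simp [hpk]

lemma foldl_insert_skip {κ ν : Type} [BEq κ] [LawfulBEq κ]
    (v : κ → ν) (l : List κ) (d : PySem.Dict κ ν) (hnd : d.keys.Nodup)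
    (hinv : ∀ k x, d.get? k = some x → x = v k) :
    l.foldl (fun d e => d.insert e (v e)) d
      = l.foldl (fun d e => if d.contains e then d else d.insert e (v e)) d := by
  induction l generalizing d with
  | nil => rfl
  | cons a t ih =>
      simp only [List.foldl_cons]
      by_cases hc : d.contains a
      · rw [if_pos hc]
        have hsome : (d.get? a).isSome := by
          rw [← PySem.Dict.contains_eq_isSome_get? d a]; exact hc
        obtain ⟨x, hx⟩ := Option.isSome_iff_exists.mp hsome
        have hxv : x = v a := hinv a x hx
        rw [hxv] at hx
        rw [insert_self_value d a (v a) hnd hx]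
        exact ih d hnd hinv
      · rw [if_neg hc]
        refine ih (d.insert a (v a)) (PySem.Dict.nodup_keys_insert d a (v a) hnd) ?_
        intro k x hk
        by_cases hka : k = a
        · subst hka
          rw [PySem.Dict.get?_insert_self] at hk
          exact (Option.some_inj.mp hk).symm
        · rw [PySem.Dict.get?_insert_of_ne d (v a) hka] at hk
          exact hinv k x hk

theorem pv_main (s : String) : freq_char_pair s = freq_char_pair_alt s := by
  unfold freq_char_pair freq_char_pair_alt
  have hsub : pvSubsA s = pvSubsB s := by
    unfold pvSubsA pvSubsB
    rw [List.nil_append]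
  rw [hsub]
  rw [PySem.List.foldl_congr_mem (pvSubsB s)
      (fun d w => if d.contains w then d else d.insert w ((pvCounts (pvSubsB s)).getD w 0))
      (fun d w => if d.contains w then d else d.insert w (((pvSubsB s).count w : Int)))
      PySem.Dict.empty
      (fun acc x hx => by simp only [counts_getD _ _ hx])]
  rw [foldl_insert_skip (fun e => (((pvSubsB s).count e : Int))) (pvSubsB s) PySem.Dict.empty
      PySem.Dict.nodup_keys_empty
      (fun k x h => by rw [PySem.Dict.get?_empty] at h; cases h)]

-- ===== VERDICT (by name: the statement is the Claim_ definition above) =====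
theorem freq_char_pair_spec : Claim_equal_freq_char_pair := by
  intro s _
  unfold Spec_freq_char_pair
  exact pv_main s
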